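-- pv_equiv track=rewrite | github.com/yubocai-poly/DQbee | Package/Combinations.py | get_decompositions
-- ===== SOURCE A (Python) =====
-- def get_decompositions(monomial):
--     """
--     Role: Compute all the decompositions of a monomial
--     Input: a tuple (2, 1, 2) represent the degree of a monomial x^2y^1z^2
--     Output: a set of decompositions of the monomial, in tuple form
--     """
--     if len(monomial) == 0:
--         return {(tuple(), tuple())}
--     result = set()
--     prev_result = get_decompositions(tuple(monomial[:-1]))
--     for r in prev_result:
--         for i in range(abs(monomial[-1]) + 1):
--             i = i if monomial[-1] >= 0 else -i
--             a, b = tuple(list(r[0]) + [i]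
--                          ), tuple(list(r[1]) + [monomial[-1] - i])
--             result.add((min(a, b), max(a, b)))
--     return result
-- ===== SOURCE B (Python) =====
-- def get_decompositions(monomial):
--     """
--     Iterative, duplicate-free enumeration: extend partial decompositions
--     component by component, keeping each pair (a, b) canonical (a <= b) by
--     construction.  For a pair with a == b the two extensions i and v-i give
--     the same canonical pair, so only the lower half of the range is emitted;
--     for a < b every i gives a distinct, already-canonical pair.  Every pair
--     is generated exactly once and no min/max canonicalisation is needed.
--     """
--     result = {((), ())}
--     for v in monomial:
--         new = set()
--         for a, b in result:
--             if a == b: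
--                 j = min(0, v)
--                 while 2 * j <= v:
--                     new.add((a + (j,), b + (v - j,)))
--                     j += 1
--             else:
--                 step = 1 if v >= 0 else -1
--                 for k in range(abs(v) + 1):
--                     new.add((a + (step * k,), b + (v - step * k,)))
--         result = new
--     return result
-- ===== Notes on version B (the rewrite author's own statement) =====
-- stated objective: alternative
-- what changed: Replaces the recursion over the last component with set-based min/max canonicalisation of every generated pair by an iterative left-to-right fold that keeps pairs canonical by construction and enumerates each decomposition exactly once (half range on diagonal pairs a==b, full range otherwise), so no min/max comparisons and no duplicate insertions occur.
import Mathlib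
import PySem

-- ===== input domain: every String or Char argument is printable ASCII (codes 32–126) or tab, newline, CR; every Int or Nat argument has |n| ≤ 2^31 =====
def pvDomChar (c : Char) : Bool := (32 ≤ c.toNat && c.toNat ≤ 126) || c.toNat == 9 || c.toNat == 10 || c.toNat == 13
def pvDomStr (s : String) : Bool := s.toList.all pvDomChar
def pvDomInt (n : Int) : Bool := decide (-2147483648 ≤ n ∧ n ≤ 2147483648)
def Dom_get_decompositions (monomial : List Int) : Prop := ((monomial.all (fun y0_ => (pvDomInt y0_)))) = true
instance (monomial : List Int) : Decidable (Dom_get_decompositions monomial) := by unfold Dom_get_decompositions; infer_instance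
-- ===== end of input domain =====

-- B replaces A's recursion + per-pair min/max canonicalisation by an iterative fold that
-- generates each canonical pair exactly once (half range on diagonal pairs a = b).
-- Both programs return sets; the lists here carry the ports' insertion order.

-- ===== PORT A =====
-- Python min(a, b) / max(a, b) on two tuples (lexicographic comparison; Lean's < on List Int
-- is exactly Python's list/tuple comparison).
def pymin (a b : List Int) : List Int := if b < a then b else a
def pymax (a b : List Int) : List Int := if b < a then a else b

def get_decompositions (monomial : List Int) : List (List Int × List Int) :=
  if _h : monomial.length = 0 then [([], [])]
  else
    let last := PySem.List.pyGetD monomial (-1) 0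
    let prev := get_decompositions (PySem.List.slice monomial none (some (-1)))
    prev.foldl (fun result r =>
      (PySem.List.pyRange 0 ((last.natAbs : Int) + 1)).foldl (fun result i0 =>
        let i := if 0 ≤ last then i0 else -i0
        let a := r.1 ++ [i]
        let b := r.2 ++ [last - i]
        PySem.Set.add result (pymin a b, pymax a b)) result) []
termination_by monomial.length
decreasing_by
  rw [PySem.List.slice_to_neg_one]
  simp only [List.length_dropLast]
  omega

-- ===== PORT B =====
-- the 'while 2*j <= v: new.add(...); j += 1' loop of Source B
def diagLoop (a b : List Int) (v j : Int) (new : PySem.Set (List Int × List Int)) :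
    PySem.Set (List Int × List Int) :=
  if 2 * j ≤ v then diagLoop a b v (j + 1) (PySem.Set.add new (a ++ [j], b ++ [v - j])) else new
termination_by (v - 2 * j + 1).toNat
decreasing_by omega

-- body of 'for v in monomial' in Source B
def altStep (v : Int) (result : PySem.Set (List Int × List Int)) : PySem.Set (List Int × List Int) :=
  result.foldl (fun new p =>
    if p.1 = p.2 then
      diagLoop p.1 p.2 v (min 0 v) new
    else
      let step : Int := if 0 ≤ v then 1 else -1
      (PySem.List.pyRange 0 ((v.natAbs : Int) + 1)).foldl
        (fun new k => PySem.Set.add new (p.1 ++ [step * k], p.2 ++ [v - step * k])) new)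
    PySem.Set.empty

def get_decompositions_alt (monomial : List Int) : List (List Int × List Int) :=
  monomial.foldl (fun result v => altStep v result) (PySem.Set.ofList [([], [])])

-- ===== PRECONDITION & SPEC =====
def Spec_get_decompositions (monomial : List Int) (out : List (List Int × List Int)) : Prop := out = get_decompositions_alt monomial
instance (monomial : List Int) (out : List (List Int × List Int)) : Decidable (Spec_get_decompositions monomial out) := by unfold Spec_get_decompositions; infer_instance

-- ===== CLAIM (what is proved, stated in full; the proofs are below) =====
def Claim_equal_get_decompositions : Prop := ∀ (monomial : List Int), Dom_get_decompositions monomial → Spec_get_decompositions monomial (get_decompositions monomial)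

-- ===== LEMMAS AND PROOFS =====

-- Lexicographic facts about Python tuple comparison (< on List Int).
theorem lex_append_iff (a : List Int) (x y : Int) : a ++ [x] < a ++ [y] ↔ x < y := by
  induction a with
  | nil => simp [List.cons_lt_cons_iff]
  | cons h t ih => simpa [List.cons_lt_cons_iff] using ih

theorem lex_append_of_lt (a b : List Int) (x y : Int) (h : a < b) (hl : a.length = b.length) :
    a ++ [x] < b ++ [y] := by
  induction a generalizing b with
  | nil => cases b <;> simp_all
  | cons ha ta ih =>
    cases b with
    | nil => simp at hl
    | cons hb tb =>
      simp only [List.cons_append, List.cons_lt_cons_iff] at h ⊢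
      rcases h with h | ⟨rfl, h⟩
      · exact Or.inl h
      · exact Or.inr ⟨rfl, ih tb h (by simpa using hl)⟩

theorem lex_lt_of_ne (a b : List Int) (hne : a ≠ b) (h : ¬ b < a) : a < b := by
  rcases lt_trichotomy a b with h1 | h1 | h1
  · exact h1
  · exact absurd h1 hne
  · exact absurd h1 h

-- proof-side copy of diagLoop without the accumulator
def dl (a b : List Int) (v j : Int) : List (List Int × List Int) :=
  if 2 * j ≤ v then (a ++ [j], b ++ [v - j]) :: dl a b v (j + 1) else []
termination_by (v - 2 * j + 1).toNat
decreasing_by omega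

theorem diagLoop_eq_dl (a b : List Int) (v j : Int) (new : PySem.Set (List Int × List Int)) :
    diagLoop a b v j new = PySem.Set.update new (dl a b v j) := by
  fun_induction diagLoop a b v j new with
  | case1 j new h ih => rw [dl, if_pos h, PySem.Set.update_cons]; exact ih
  | case2 j new h => rw [dl, if_neg h]; rfl

-- closed form for dl when started at j with exactly n+1 iterations left
theorem dl_eq (a b : List Int) (v : Int) (n : Nat) : ∀ (j : Int),
    2 * (j + n) ≤ v → v < 2 * (j + n) + 2 →
    dl a b v j = (List.range (n + 1)).map (fun t : Nat => (a ++ [(j + t : Int)], b ++ [v - (j + t)])) := by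
  induction n with
  | zero =>
    intro j h1 h2
    rw [dl, if_pos (by omega), dl, if_neg (by omega)]
    simp
  | succ n ih =>
    intro j h1 h2
    rw [dl, if_pos (by omega), ih (j+1) (by push_cast at *; omega) (by push_cast at *; omega)]
    conv_rhs => rw [List.range_succ_eq_map, List.map_cons, List.map_map]
    congr 1
    · simp
    apply List.map_congr_left; intro t _
    have h3 : j + 1 + (t:Int) = j + ((t+1 : Nat) : Int) := by push_cast; ring
    simp [Nat.succ_eq_add_one, h3]

theorem dl_min_eq (a b : List Int) (v : Int) :
    dl a b v (min 0 v) = (List.range (v.natAbs / 2 + 1)).map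
      (fun t : Nat => (a ++ [(min 0 v + t : Int)], b ++ [v - (min 0 v + t)])) := by
  apply dl_eq a b v (v.natAbs / 2) (min 0 v) <;> omega

-- sign-adjusted index 'i = i if monomial[-1] >= 0 else -i'
def sgnApply (v i0 : Int) : Int := if 0 ≤ v then i0 else -i0

-- the canonical-pair constructor of A's inner loop
def rawPair (v : Int) (r : List Int × List Int) (i0 : Int) : List Int × List Int :=
  (pymin (r.1 ++ [sgnApply v i0]) (r.2 ++ [v - sgnApply v i0]),
   pymax (r.1 ++ [sgnApply v i0]) (r.2 ++ [v - sgnApply v i0]))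

def seqA (v : Int) (r : List Int × List Int) : List (List Int × List Int) :=
  (PySem.List.pyRange 0 ((v.natAbs : Int) + 1)).map (rawPair v r)

def offdL (v : Int) (r : List Int × List Int) : List (List Int × List Int) :=
  (PySem.List.pyRange 0 ((v.natAbs : Int) + 1)).map
    (fun k => (r.1 ++ [(if 0 ≤ v then (1:Int) else -1) * k], r.2 ++ [v - (if 0 ≤ v then (1:Int) else -1) * k]))

def groupB (v : Int) (r : List Int × List Int) : List (List Int × List Int) :=
  if r.1 = r.2 then dl r.1 r.2 v (min 0 v) else offdL v r

def canonR (n : Nat) (r : List Int × List Int) : Prop :=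
  r.1.length = n ∧ r.2.length = n ∧ ¬ r.2 < r.1

def PairInv (n : Nat) (S : List (List Int × List Int)) : Prop :=
  S.Nodup ∧ ∀ r ∈ S, canonR n r

theorem foldl_update_flatMap {α β : Type} [BEq β] (f : α → List β) :
    ∀ (S : List α) (s : PySem.Set β),
    S.foldl (fun res r => PySem.Set.update res (f r)) s = PySem.Set.update s (S.flatMap f) := by
  intro S
  induction S with
  | nil => intro s; simp [PySem.Set.update]
  | cons r S ih => intro s; simp only [List.foldl_cons, List.flatMap_cons, ih, PySem.Set.update_append]

theorem A_unfold (m : List Int) (v : Int) :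
    get_decompositions (m ++ [v]) = PySem.Set.ofList ((get_decompositions m).flatMap (seqA v)) := by
  rw [get_decompositions]
  rw [dif_neg (by simp)]
  have hlast : PySem.List.pyGetD (m ++ [v]) (-1) 0 = v := by
    simp [PySem.List.pyGetD, PySem.List.pyGet?, PySem.List.pyIdx?]
  simp only [hlast, PySem.List.slice_to_neg_one, List.dropLast_concat]
  have hbody : (fun (result : List (List Int × List Int)) (r : List Int × List Int) =>
      (PySem.List.pyRange 0 ((v.natAbs : Int) + 1)).foldl (fun result i0 =>
        let i := if 0 ≤ v then i0 else -i0
        let a := r.1 ++ [i]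
        let b := r.2 ++ [v - i]
        PySem.Set.add result (pymin a b, pymax a b)) result)
      = (fun res r => PySem.Set.update res (seqA v r)) := by
    funext res r
    rw [seqA, PySem.Set.update_map_eq_foldl_add]
    rfl
  rw [hbody, foldl_update_flatMap, PySem.Set.update_nil_left]

theorem altStep_eq_ofList (v : Int) (S : PySem.Set (List Int × List Int)) :
    altStep v S = PySem.Set.ofList (S.flatMap (groupB v)) := by
  unfold altStep
  have hbody : (fun (new : PySem.Set (List Int × List Int)) (p : List Int × List Int) =>
      if p.1 = p.2 then diagLoop p.1 p.2 v (min 0 v) new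
      else
        let step : Int := if 0 ≤ v then 1 else -1
        (PySem.List.pyRange 0 ((v.natAbs : Int) + 1)).foldl
          (fun new k => PySem.Set.add new (p.1 ++ [step * k], p.2 ++ [v - step * k])) new)
      = (fun new p => PySem.Set.update new (groupB v p)) := by
    funext new p
    by_cases hp : p.1 = p.2
    · rw [if_pos hp, diagLoop_eq_dl, groupB, if_pos hp]
    · rw [if_neg hp, groupB, if_neg hp, offdL]
      rw [PySem.Set.update_map_eq_foldl_add]
  rw [hbody, foldl_update_flatMap]
  exact PySem.Set.update_empty _

theorem dl_shape (a b : List Int) (v j0 : Int) :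
    ∀ q ∈ dl a b v j0, ∃ x, q = (a ++ [x], b ++ [v - x]) := by
  fun_induction dl a b v j0 with
  | case1 j hc ih =>
    intro q hq
    rcases List.mem_cons.mp hq with rfl | hq
    · exact ⟨j, rfl⟩
    · exact ih q hq
  | case2 j hc => intro q hq; simp at hq

theorem groupB_shape (v : Int) (r : List Int × List Int) :
    ∀ q ∈ groupB v r, ∃ x, q = (r.1 ++ [x], r.2 ++ [v - x]) := by
  intro q hq
  unfold groupB at hq
  split at hq
  · exact dl_shape _ _ _ _ q hq
  · obtain ⟨k, _, rfl⟩ := List.mem_map.mp hq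
    exact ⟨(if 0 ≤ v then (1:Int) else -1) * k, rfl⟩

theorem groupB_disjoint (v : Int) (r r' : List Int × List Int) (hne : r ≠ r') :
    ∀ q ∈ groupB v r, q ∉ groupB v r' := by
  intro q hq hq'
  obtain ⟨x, rfl⟩ := groupB_shape v r q hq
  obtain ⟨x', hx'⟩ := groupB_shape v r' _ hq'
  apply hne
  have h1 := congrArg Prod.fst hx'
  have h2 := congrArg Prod.snd hx'
  simp only at h1 h2
  have e1 : r.1 = r'.1 := by
    have := congrArg List.dropLast h1; simpa [List.dropLast_concat] using this
  have e2 : r.2 = r'.2 := by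
    have := congrArg List.dropLast h2; simpa [List.dropLast_concat] using this
  exact Prod.ext e1 e2

theorem update_of_subset {β : Type} [BEq β] [LawfulBEq β] (s : PySem.Set β) (xs : List β)
    (h : ∀ x ∈ xs, x ∈ s) : PySem.Set.update s xs = s := by
  rw [PySem.Set.update_eq_append_filter]
  have hf : (PySem.Set.ofList xs).filter (fun y => !(PySem.Set.contains s y)) = [] := by
    apply List.filter_eq_nil_iff.mpr
    intro x hx
    rw [PySem.Set.mem_ofList] at hx
    simp
    exact h x hx
  rw [hf, List.append_nil]

theorem groupB_nodup (v : Int) (r : List Int × List Int) : (groupB v r).Nodup := by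
  unfold groupB
  split
  · rw [dl_min_eq]
    apply List.Nodup.map _ List.nodup_range
    intro t1 t2 he
    have h1 := congrArg Prod.fst he
    simp only at h1
    have h2 := List.append_cancel_left h1
    simp only [List.cons.injEq, and_true] at h2
    omega
  · apply List.Nodup.map _ ?_
    · intro k1 k2 he
      have := congrArg Prod.fst he
      simp only at this
      have h2 := List.append_cancel_left this
      simp only [List.cons.injEq, and_true] at h2
      by_cases hv : 0 ≤ v <;> simp [hv] at h2 <;> omega
    · exact PySem.List.nodup_pyRange_one 0 _

-- seqA through Nat range
theorem seqA_eq_map_range (v : Int) (r : List Int × List Int) :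
    seqA v r = (List.range (v.natAbs + 1)).map (fun t : Nat => rawPair v r (t : Int)) := by
  unfold seqA
  rw [show ((v.natAbs : Int) + 1) = ((v.natAbs + 1 : Nat) : Int) by push_cast; ring,
    PySem.List.pyRange_zero_natCast, List.map_map]
  rfl

-- rawPair on a diagonal pair
theorem rawPair_diag (v : Int) (r : List Int × List Int) (hp : r.1 = r.2) (i0 : Int) :
    rawPair v r i0 =
      ((r.1 ++ [if v - sgnApply v i0 < sgnApply v i0
                then v - sgnApply v i0 else sgnApply v i0]),
       (r.1 ++ [if v - sgnApply v i0 < sgnApply v i0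
                then sgnApply v i0 else v - sgnApply v i0])) := by
  unfold rawPair pymin pymax
  rw [← hp]
  by_cases hc : v - sgnApply v i0 < sgnApply v i0
  · have hcc := (lex_append_iff r.1 (v - sgnApply v i0) (sgnApply v i0)).mpr hc
    simp only [if_pos hcc, if_pos hc]
  · have hcc := fun hx => hc ((lex_append_iff r.1 (v - sgnApply v i0) (sgnApply v i0)).mp hx)
    simp only [if_neg hcc, if_neg hc]

-- rawPair on an off-diagonal canonical pair
theorem rawPair_offd (v : Int) (n : Nat) (r : List Int × List Int) (hc : canonR n r)
    (hp : r.1 ≠ r.2) (i0 : Int) :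
    rawPair v r i0 = (r.1 ++ [sgnApply v i0], r.2 ++ [v - sgnApply v i0]) := by
  obtain ⟨h1, h2, h3⟩ := hc
  have hlt : r.1 < r.2 := lex_lt_of_ne _ _ hp h3
  have hll : r.1 ++ [sgnApply v i0] < r.2 ++ [v - sgnApply v i0] :=
    lex_append_of_lt _ _ _ _ hlt (by omega)
  unfold rawPair pymin pymax
  simp only [if_neg (List.lt_asymm hll)]

theorem app_inj (a : List Int) (x y : Int) : a ++ [x] = a ++ [y] ↔ x = y := by simp

theorem rawPair_sym (v : Int) (r : List Int × List Int) (hp : r.1 = r.2) (t : Nat)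
    (ht : t ≤ v.natAbs) : rawPair v r ((v.natAbs - t : Nat) : Int) = rawPair v r (t : Int) := by
  rw [rawPair_diag v r hp, rawPair_diag v r hp]
  simp only [Prod.ext_iff, app_inj]
  unfold sgnApply
  split_ifs <;> omega

theorem group_ofList (v : Int) (n : Nat) (r : List Int × List Int) (hr : canonR n r) :
    PySem.Set.ofList (seqA v r) = groupB v r := by
  by_cases hp : r.1 = r.2
  · -- diagonal: the first half of the range gives dl, the rest are repeats
    have hnodup : (dl r.1 r.2 v (min 0 v)).Nodup := by
      have hnd := groupB_nodup v r
      rwa [groupB, if_pos hp] at hnd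
    have hL1 : (List.range (v.natAbs / 2 + 1)).map (fun t : Nat => rawPair v r (t : Int))
        = dl r.1 r.2 v (min 0 v) := by
      rw [dl_min_eq]
      apply List.map_congr_left
      intro t ht
      simp only [List.mem_range] at ht
      rw [rawPair_diag v r hp]
      simp only [Prod.ext_iff, app_inj, ← hp]
      unfold sgnApply
      constructor <;> (split_ifs <;> omega)
    have hsplit : List.range (v.natAbs + 1)
        = List.range (v.natAbs / 2 + 1)
          ++ (List.range (v.natAbs - v.natAbs / 2)).map (fun x => (v.natAbs / 2 + 1) + x) := by
      rw [← List.range_add]; congr 1; omega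
    rw [seqA_eq_map_range, hsplit, List.map_append, PySem.Set.ofList_append, hL1,
      PySem.Set.ofList_eq_self_of_nodup _ hnodup, groupB, if_pos hp]
    apply update_of_subset
    intro q hq
    simp only [List.map_map, List.mem_map, List.mem_range, Function.comp_def] at hq
    obtain ⟨s, hs, rfl⟩ := hq
    rw [← hL1]
    have hms : v.natAbs / 2 + 1 + s ≤ v.natAbs := by omega
    rw [← rawPair_sym v r hp _ hms]
    exact List.mem_map.mpr ⟨v.natAbs - (v.natAbs / 2 + 1 + s), by simp only [List.mem_range]; omega, rfl⟩
  · -- off-diagonal: no duplicates at all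
    have heq : seqA v r = offdL v r := by
      unfold seqA offdL
      apply List.map_congr_left
      intro i0 _
      rw [rawPair_offd v n r hr hp i0]
      have hs : (if 0 ≤ v then (1:Int) else -1) * i0 = sgnApply v i0 := by
        unfold sgnApply; split_ifs <;> ring
      rw [hs]
    have hnodup : (offdL v r).Nodup := by
      have hnd := groupB_nodup v r
      rwa [groupB, if_neg hp] at hnd
    rw [heq, PySem.Set.ofList_eq_self_of_nodup _ hnodup, groupB, if_neg hp]

theorem main_step (v : Int) (n : Nat) (S : List (List Int × List Int)) (h : PairInv n S) :
    PySem.Set.ofList (S.flatMap (seqA v)) = S.flatMap (groupB v) := by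
  induction S with
  | nil => rfl
  | cons r S ih =>
    obtain ⟨hnd, hcan⟩ := h
    have hihr := ih ⟨(List.nodup_cons.mp hnd).2, fun r' hr' => hcan r' (List.mem_cons_of_mem r hr')⟩
    rw [List.flatMap_cons, List.flatMap_cons, PySem.Set.ofList_append,
      group_ofList v n r (hcan r List.mem_cons_self), PySem.Set.update_eq_append_filter, hihr]
    congr 1
    apply List.filter_eq_self.mpr
    intro q hq
    obtain ⟨r', hr', hqr'⟩ := List.mem_flatMap.mp hq
    have hne : r' ≠ r := by
      rintro rfl
      exact (List.nodup_cons.mp hnd).1 hr'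
    have hnotin : q ∉ groupB v r := groupB_disjoint v r' r hne q hqr'
    simp
    exact fun hc => hnotin hc

theorem inv_step (v : Int) (n : Nat) (S : List (List Int × List Int)) (h : PairInv n S) :
    PairInv (n + 1) (S.flatMap (groupB v)) := by
  obtain ⟨hnd, hcan⟩ := h
  constructor
  · apply List.nodup_flatMap.mpr
    refine ⟨fun r _ => groupB_nodup v r, ?_⟩
    refine List.Pairwise.imp ?_ hnd
    intro a b hne
    exact fun q hq hq' => groupB_disjoint v a b hne q hq hq'
  · intro q hq
    obtain ⟨r, hr, hqr⟩ := List.mem_flatMap.mp hq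
    obtain ⟨hl1, hl2, hcr⟩ := hcan r hr
    obtain ⟨x, rfl⟩ := groupB_shape v r q hqr
    refine ⟨by simp [hl1], by simp [hl2], ?_⟩
    by_cases hp : r.1 = r.2
    · -- diagonal entry: comes from dl, where 2*(index) ≤ v
      rw [groupB, if_pos hp] at hqr
      rw [dl_min_eq] at hqr
      obtain ⟨t, ht, hqt⟩ := List.mem_map.mp hqr
      simp only [List.mem_range] at ht
      have e1 : r.1 ++ [x] = r.1 ++ [(min 0 v + t : Int)] := congrArg Prod.fst hqt.symm
      have e2 : x = min 0 v + t := (app_inj _ _ _).mp e1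
      rw [← hp, lex_append_iff]
      omega
    · have hlt : r.1 < r.2 := lex_lt_of_ne _ _ hp hcr
      exact List.lt_asymm (lex_append_of_lt _ _ _ _ hlt (by omega))

theorem altStep_eq (v : Int) (n : Nat) (S : List (List Int × List Int)) (h : PairInv n S) :
    altStep v S = S.flatMap (groupB v) := by
  rw [altStep_eq_ofList,
    PySem.Set.ofList_eq_self_of_nodup _ (inv_step v n S h).1]

def core (m : List Int) : List (List Int × List Int) :=
  m.foldl (fun result v => altStep v result) (PySem.Set.ofList [([], [])])

theorem main (m : List Int) : get_decompositions m = core m ∧ PairInv m.length (core m) := by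
  induction m using List.reverseRecOn with
  | nil =>
    have hc : core [] = [([], [])] := by decide
    refine ⟨by rw [get_decompositions, hc]; rfl, by rw [hc]; simp, ?_⟩
    intro r hr
    rw [hc, List.mem_singleton] at hr
    subst hr
    exact ⟨rfl, rfl, by decide⟩
  | append_singleton m v ih =>
    obtain ⟨hA, hInv⟩ := ih
    have hcore : core (m ++ [v]) = altStep v (core m) := by
      simp [core, List.foldl_append]
    constructor
    · rw [A_unfold, hA, main_step v m.length (core m) hInv, hcore,
        altStep_eq v m.length (core m) hInv]
    · rw [hcore, altStep_eq v m.length (core m) hInv]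
      simpa using inv_step v m.length (core m) hInv

-- ===== VERDICT (by name: the statement is the Claim_ definition above) =====
theorem get_decompositions_spec : Claim_equal_get_decompositions := by
  intro m _
  obtain ⟨hA, _⟩ := main m
  exact hA
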